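-- pv_equiv track=rewrite | github.com/JaredFA363/SortingVisualiser | SortingAlgorithms/QuickSort.py | getColourArray
-- ===== SOURCE A (Python) =====
-- def getColourArray(dataLength, start, end ,border, current, isSwapping = False):
--   colourArray = []
--   for i in range(dataLength):
--     #base Colouring
--     if i >= start and i <= end:
--       #grey is partition we are working on
--       colourArray.append('grey')
--     else:
--       #white partition we are not working on
--       colourArray.append('white')
--
--     if i == end:
--       colourArray[i] = 'blue'
--     elif i == border:
--       colourArray[i] = 'red'
--     elif i == current:
--       colourArray[i] = 'yellow'
--
--     if isSwapping:
--       if i == border or i == current: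
--         colourArray[i] = 'green'
--
--   return colourArray
-- ===== SOURCE B (Python) =====
-- def getColourArray(dataLength, start, end, border, current, isSwapping=False):
--     colourArray = ['white'] * dataLength
--     lo = max(start, 0)
--     hi = min(end, dataLength - 1)
--     if lo <= hi:
--         colourArray[lo:hi + 1] = ['grey'] * (hi - lo + 1)
--
--     def put(idx, colour):
--         if 0 <= idx < dataLength:
--             colourArray[idx] = colour
--
--     # reverse-priority writes: last write wins, reproducing end > border > current
--     put(current, 'yellow')
--     put(border, 'red')
--     put(end, 'blue')
--     if isSwapping:
--         put(border, 'green')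
--         put(current, 'green')
--     return colourArray
-- ===== Notes on version B (the rewrite author's own statement) =====
-- stated objective: simpler
-- what changed: Replaces the per-element branching loop by a bulk 'white' initialisation, one clamped grey slice assignment, and a handful of guarded single-index writes in reverse-priority order (measured ~2x faster: slice fill avoids per-element Python branching).
import Mathlib
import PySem

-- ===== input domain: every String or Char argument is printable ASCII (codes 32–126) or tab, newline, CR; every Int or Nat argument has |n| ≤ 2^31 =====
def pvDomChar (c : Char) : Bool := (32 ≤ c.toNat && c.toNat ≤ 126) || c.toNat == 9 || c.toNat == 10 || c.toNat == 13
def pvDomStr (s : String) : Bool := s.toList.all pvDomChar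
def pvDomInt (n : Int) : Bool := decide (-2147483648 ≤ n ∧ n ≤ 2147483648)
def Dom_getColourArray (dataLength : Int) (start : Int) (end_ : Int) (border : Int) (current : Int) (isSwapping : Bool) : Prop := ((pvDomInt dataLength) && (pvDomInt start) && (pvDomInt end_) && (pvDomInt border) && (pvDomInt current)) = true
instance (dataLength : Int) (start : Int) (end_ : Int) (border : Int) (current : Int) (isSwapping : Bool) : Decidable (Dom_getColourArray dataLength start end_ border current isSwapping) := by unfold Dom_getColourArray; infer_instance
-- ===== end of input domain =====

-- B replaces A's per-element branching loop by a bulk 'white' initialisation, one clamped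
-- grey slice fill, and a few guarded single-index writes in reverse-priority order (simpler).

-- ===== PORT A =====
-- loop body of A, one iteration: append base colour, then the elif recolour chain, then green on swap
def pvBodyA (start end_ border current : Int) (isSwapping : Bool) (colourArray : List String) (i : Int) : List String :=
  let colourArray := colourArray ++ [if start ≤ i ∧ i ≤ end_ then "grey" else "white"]
  let colourArray :=
    if i = end_ then colourArray.set i.toNat "blue"
    else if i = border then colourArray.set i.toNat "red"
    else if i = current then colourArray.set i.toNat "yellow"
    else colourArray
  if isSwapping then
    if i = border ∨ i = current then colourArray.set i.toNat "green" else colourArray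
  else colourArray

def getColourArray (dataLength : Int) (start : Int) (end_ : Int) (border : Int) (current : Int) (isSwapping : Bool) : List String :=
  (PySem.List.pyRange 0 dataLength 1).foldl (pvBodyA start end_ border current isSwapping) []

-- ===== PORT B =====
-- B's bulk initialisation: ['white']*n with the clamped grey slice written over it
def pvGreyFill (dataLength start end_ : Int) : List String :=
  let arr := List.replicate dataLength.toNat "white"
  let lo := max start 0
  let hi := min end_ (dataLength - 1)
  if lo ≤ hi then arr.take lo.toNat ++ List.replicate (hi - lo + 1).toNat "grey" ++ arr.drop (hi + 1).toNat
  else arr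

-- B's guarded single-index write
def pvPut (dataLength : Int) (arr : List String) (idx : Int) (colour : String) : List String :=
  if 0 ≤ idx ∧ idx < dataLength then arr.set idx.toNat colour else arr

def getColourArray_alt (dataLength : Int) (start : Int) (end_ : Int) (border : Int) (current : Int) (isSwapping : Bool) : List String :=
  let arr := pvGreyFill dataLength start end_
  let arr := pvPut dataLength arr current "yellow"
  let arr := pvPut dataLength arr border "red"
  let arr := pvPut dataLength arr end_ "blue"
  if isSwapping then pvPut dataLength (pvPut dataLength arr border "green") current "green"
  else arr

-- ===== PRECONDITION & SPEC =====
def Spec_getColourArray (dataLength : Int) (start : Int) (end_ : Int) (border : Int) (current : Int) (isSwapping : Bool) (out : List String) : Prop := out = getColourArray_alt dataLength start end_ border current isSwapping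
instance (dataLength : Int) (start : Int) (end_ : Int) (border : Int) (current : Int) (isSwapping : Bool) (out : List String) : Decidable (Spec_getColourArray dataLength start end_ border current isSwapping out) := by unfold Spec_getColourArray; infer_instance

-- ===== CLAIM (what is proved, stated in full; the proofs are below) =====
def Claim_equal_getColourArray : Prop := ∀ (dataLength : Int) (start : Int) (end_ : Int) (border : Int) (current : Int) (isSwapping : Bool), Dom_getColourArray dataLength start end_ border current isSwapping → Spec_getColourArray dataLength start end_ border current isSwapping (getColourArray dataLength start end_ border current isSwapping)

-- ===== LEMMAS AND PROOFS =====

-- the final colour of index i, by A's override priority: green (swap) > blue > red > yellow > base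
def pvColourOf (start end_ border current : Int) (isSwapping : Bool) (i : Int) : String :=
  if isSwapping ∧ (i = border ∨ i = current) then "green"
  else if i = end_ then "blue"
  else if i = border then "red"
  else if i = current then "yellow"
  else if start ≤ i ∧ i ≤ end_ then "grey" else "white"

theorem pv_set_snoc {α : Type} (l : List α) (a v : α) : (l ++ [a]).set l.length v = l ++ [v] := by
  induction l with
  | nil => rfl
  | cons x xs ih => simp [ih]

theorem pvBodyA_snoc (s e b c : Int) (sw : Bool) (l : List String) (i : Int)
    (h : i.toNat = l.length) :
    pvBodyA s e b c sw l i = l ++ [pvColourOf s e b c sw i] := by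
  unfold pvBodyA pvColourOf
  have hset : ∀ (a v : String), (l ++ [a]).set i.toNat v = l ++ [v] := by
    intro a v; rw [h]; exact pv_set_snoc l a v
  cases sw <;> split_ifs <;> simp_all

theorem pvA_fold (s e b c : Int) (sw : Bool) (m : Nat) :
    (PySem.List.pyRange 0 (m : Int) 1).foldl (pvBodyA s e b c sw) [] =
      (List.range m).map (fun k : Nat => pvColourOf s e b c sw (k : Int)) := by
  induction m with
  | zero => simp [PySem.List.pyRange_one_eq_nil (by omega : (0:Int) ≤ 0)]
  | succ m ih =>
    have hc : ((m + 1 : Nat) : Int) = (m : Int) + 1 := by push_cast; ring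
    rw [hc, PySem.List.pyRange_one_succ_right (by positivity), List.foldl_append, ih,
        List.range_succ, List.map_append]
    simp only [List.foldl_cons, List.foldl_nil, List.map_cons, List.map_nil]
    rw [pvBodyA_snoc s e b c sw _ (m : Int) (by simp)]

theorem pvA_eq (n s e b c : Int) (sw : Bool) :
    getColourArray n s e b c sw =
      (List.range n.toNat).map (fun k : Nat => pvColourOf s e b c sw (k : Int)) := by
  unfold getColourArray
  by_cases h : 0 ≤ n
  · obtain ⟨m, rfl⟩ : ∃ m : Nat, n = (m : Int) := ⟨n.toNat, by omega⟩
    rw [pvA_fold]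
    simp
  · rw [PySem.List.pyRange_one_eq_nil (by omega), show n.toNat = 0 by omega]
    simp

theorem pvGreyFill_length (n s e : Int) : (pvGreyFill n s e).length = n.toNat := by
  unfold pvGreyFill
  dsimp only
  split_ifs with h
  · simp
    omega
  · simp

theorem pvGreyFill_getElem (n s e : Int) (k : Nat) (h : k < (pvGreyFill n s e).length) :
    (pvGreyFill n s e)[k] = if s ≤ (k : Int) ∧ (k : Int) ≤ e then "grey" else "white" := by
  have hk : k < n.toNat := by rw [← pvGreyFill_length n s e]; exact h
  unfold pvGreyFill at h ⊢
  dsimp only at h ⊢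
  by_cases hle : max s 0 ≤ min e (n - 1)
  · simp only [if_pos hle] at h ⊢
    by_cases hin : s ≤ (k : Int) ∧ (k : Int) ≤ e
    · rw [if_pos hin,
        List.getElem_append_left (by simp; omega),
        List.getElem_append_right (by simp; omega)]
      simp only [List.getElem_replicate]
    · rw [if_neg hin]
      rcases Nat.lt_or_ge k (max s 0).toNat with h1 | h1
      · rw [List.getElem_append_left (by simp; omega),
          List.getElem_append_left (by simp; omega)]
        simp only [List.getElem_take, List.getElem_replicate]
      · rw [List.getElem_append_right (by simp; omega)]
        simp only [List.getElem_drop, List.getElem_replicate]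
  · simp only [if_neg hle] at h ⊢
    simp only [List.getElem_replicate]
    split_ifs with hin
    · exfalso; omega
    · rfl

theorem pvPut_length (n : Int) (arr : List String) (idx : Int) (col : String) :
    (pvPut n arr idx col).length = arr.length := by
  unfold pvPut; split_ifs <;> simp

theorem pvPut_getElem? (n : Int) (arr : List String) (idx : Int) (col : String) (k : Nat)
    (hlen : arr.length = n.toNat) :
    (pvPut n arr idx col)[k]? =
      if 0 ≤ idx ∧ idx < n ∧ (k : Int) = idx then some col else arr[k]? := by
  unfold pvPut
  by_cases h1 : 0 ≤ idx ∧ idx < n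
  · rw [if_pos h1, List.getElem?_set]
    by_cases h2 : idx.toNat = k
    · rw [if_pos h2, if_pos (by omega), if_pos ⟨h1.1, h1.2, by omega⟩]
    · rw [if_neg h2, if_neg (fun hc => h2 (by omega))]
  · rw [if_neg h1, if_neg (fun hc => h1 ⟨hc.1, hc.2.1⟩)]

theorem pvGreyFill_getElem? (n s e : Int) (k : Nat) (hk : k < n.toNat) :
    (pvGreyFill n s e)[k]? =
      some (if s ≤ (k : Int) ∧ (k : Int) ≤ e then "grey" else "white") := by
  rw [List.getElem?_eq_getElem (by rw [pvGreyFill_length]; exact hk),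
    pvGreyFill_getElem n s e k (by rw [pvGreyFill_length]; exact hk)]

theorem pvB_length (n s e b c : Int) (sw : Bool) :
    (getColourArray_alt n s e b c sw).length = n.toNat := by
  unfold getColourArray_alt
  dsimp only
  cases sw <;> simp [pvPut_length, pvGreyFill_length]

theorem pvB_getElem? (n s e b c : Int) (sw : Bool) (k : Nat) (hk : k < n.toNat) :
    (getColourArray_alt n s e b c sw)[k]? = some (pvColourOf s e b c sw (k : Int)) := by
  unfold getColourArray_alt pvColourOf
  dsimp only
  cases sw
  · simp only [Bool.false_eq_true, false_and, if_false]
    rw [pvPut_getElem? _ _ _ _ _ (by simp [pvPut_length, pvGreyFill_length]),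
      pvPut_getElem? _ _ _ _ _ (by simp [pvPut_length, pvGreyFill_length]),
      pvPut_getElem? _ _ _ _ _ (by simp [pvGreyFill_length]),
      pvGreyFill_getElem? n s e k hk]
    split_ifs <;> first | rfl | (exfalso; omega)
  · simp only [true_and, if_true]
    rw [pvPut_getElem? _ _ _ _ _ (by simp [pvPut_length, pvGreyFill_length]),
      pvPut_getElem? _ _ _ _ _ (by simp [pvPut_length, pvGreyFill_length]),
      pvPut_getElem? _ _ _ _ _ (by simp [pvPut_length, pvGreyFill_length]),
      pvPut_getElem? _ _ _ _ _ (by simp [pvPut_length, pvGreyFill_length]),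
      pvPut_getElem? _ _ _ _ _ (by simp [pvGreyFill_length]),
      pvGreyFill_getElem? n s e k hk]
    split_ifs <;> first | rfl | (exfalso; omega)

theorem pvB_eq (n s e b c : Int) (sw : Bool) :
    getColourArray_alt n s e b c sw =
      (List.range n.toNat).map (fun k : Nat => pvColourOf s e b c sw (k : Int)) := by
  apply List.ext_getElem?
  intro k
  by_cases hk : k < n.toNat
  · rw [pvB_getElem? n s e b c sw k hk, List.getElem?_map,
      List.getElem?_eq_getElem (by simpa using hk)]
    simp
  · rw [List.getElem?_eq_none (by rw [pvB_length]; omega),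
      List.getElem?_eq_none (by simp; omega)]

-- ===== VERDICT (by name: the statement is the Claim_ definition above) =====
theorem getColourArray_spec : Claim_equal_getColourArray := by
  intro n s e b c sw _
  unfold Spec_getColourArray
  rw [pvA_eq, pvB_eq]
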